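-- pv_equiv track=rewrite | github.com/mholgatem/FiniteStateMachine | grade_fsm.py | combinations_from_values
-- ===== SOURCE A (Python) =====
-- from typing import Dict, Iterable, List, Mapping, MutableMapping, Optional, Tuple
--
-- def normalize_binary_value(val: Optional[str]) -> str:
--     """Normalize binary characters, preserving ``X`` for don't-care."""
--
--     if val is None:
--         return ""
--     normalized = str(val).upper().strip()
--     for char in normalized:
--         if char in {"0", "1", "X"}:
--             return char
--     return ""
--
-- def combinations_from_values(values: List[str]) -> List[str]:
--     """Expand selections containing ``X`` into all concrete combos."""
--
--     combos = [""]
--     for val in values: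
--         normalized = normalize_binary_value(val) or "X"
--         options = ["0", "1"] if normalized == "X" else [normalized]
--         next_combos: List[str] = []
--         for prefix in combos:
--             for option in options:
--                 next_combos.append(f"{prefix}{option}")
--         combos = next_combos
--     return combos
-- ===== SOURCE B (Python) =====
-- from itertools import product
-- from typing import List, Optional
--
--
-- def normalize_binary_value(val: Optional[str]) -> str:
--     if val is None:
--         return ""
--     normalized = str(val).upper().strip()
--     for char in normalized:
--         if char in {"0", "1", "X"}:
--             return char
--     return ""
--
--
-- def combinations_from_values(values: List[str]) -> List[str]:
--     """Expand selections containing ``X`` into all concrete combos."""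
--     template = [normalize_binary_value(v) or "X" for v in values]
--     n_x = template.count("X")
--     result = []
--     for bits in product("01", repeat=n_x):
--         it = iter(bits)
--         result.append("".join(next(it) if c == "X" else c for c in template))
--     return result
-- ===== Notes on version B (the rewrite author's own statement) =====
-- stated objective: alternative
-- what changed: Replaces the incremental prefix-expansion fold (rebuilding the whole combo list at every position) with a normalized template computed once plus itertools.product over the don't-care positions, substituting each bit tuple into the template.
import Mathlib
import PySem

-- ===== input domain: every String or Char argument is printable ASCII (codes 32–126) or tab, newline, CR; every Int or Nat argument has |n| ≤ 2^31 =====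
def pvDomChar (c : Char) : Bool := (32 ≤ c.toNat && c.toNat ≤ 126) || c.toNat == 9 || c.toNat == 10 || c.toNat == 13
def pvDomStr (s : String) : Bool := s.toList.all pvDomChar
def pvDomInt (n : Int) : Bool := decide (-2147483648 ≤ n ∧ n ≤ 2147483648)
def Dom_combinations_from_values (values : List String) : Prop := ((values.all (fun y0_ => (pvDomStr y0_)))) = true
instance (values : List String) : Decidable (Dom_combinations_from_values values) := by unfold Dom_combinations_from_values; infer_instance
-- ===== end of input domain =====

-- B replaces A's incremental prefix-expansion fold with a normalized template computed once
-- plus a product over the don't-care positions (objective: alternative decomposition).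

-- ===== PORT A =====
-- helper: for-loop returning the first char of the string that is '0', '1' or 'X', else ""
def findBinChar : List Char → String
  | [] => ""
  | c :: rest => if c = '0' ∨ c = '1' ∨ c = 'X' then String.ofList [c] else findBinChar rest

-- the `val is None` branch is unreachable here: the only caller passes a str
def normalize_binary_value (val : String) : String :=
  let normalized := PySem.Str.strip (PySem.Str.upper val)
  findBinChar normalized.toList

def combinations_from_values (values : List String) : List String :=
  values.foldl (fun combos val =>
    let normalized := if normalize_binary_value val = "" then "X" else normalize_binary_value val
    let options := if normalized = "X" then ["0", "1"] else [normalized]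
    combos.flatMap (fun pfx => options.map (fun option => pfx ++ option))) [""]

-- ===== PORT B =====
-- itertools.product("01", repeat=n): leftmost position varies slowest
def pyProduct01 : Nat → List (List String)
  | 0 => [[]]
  | n + 1 => ["0", "1"].flatMap (fun b => (pyProduct01 n).map (fun bits => b :: bits))

-- the generator `next(it) if c == "X" else c for c in template`, consuming `bits` in order;
-- headD's default is never used: bits always carries one entry per remaining "X"
def fillTemplate : List String → List String → List String
  | [], _ => []
  | c :: t, bits => if c = "X" then bits.headD "" :: fillTemplate t bits.tail else c :: fillTemplate t bits

def combinations_from_values_alt (values : List String) : List String :=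
  let template := values.map (fun v => if normalize_binary_value v = "" then "X" else normalize_binary_value v)
  let nX := template.count "X"
  (pyProduct01 nX).map (fun bits => PySem.Str.join "" (fillTemplate template bits))

-- ===== PRECONDITION & SPEC =====
def Spec_combinations_from_values (values : List String) (out : List String) : Prop := out = combinations_from_values_alt values
instance (values : List String) (out : List String) : Decidable (Spec_combinations_from_values values out) := by unfold Spec_combinations_from_values; infer_instance

-- ===== CLAIM (what is proved, stated in full; the proofs are below) =====
def Claim_equal_combinations_from_values : Prop := ∀ (values : List String), Dom_combinations_from_values values → Spec_combinations_from_values values (combinations_from_values values)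

-- ===== LEMMAS AND PROOFS =====

-- the normalized template entry for one input value
def npv (v : String) : String := if normalize_binary_value v = "" then "X" else normalize_binary_value v

-- A's loop body, named
def stepA (combos : List String) (val : String) : List String :=
  let normalized := if normalize_binary_value val = "" then "X" else normalize_binary_value val
  let options := if normalized = "X" then ["0", "1"] else [normalized]
  combos.flatMap (fun pfx => options.map (fun option => pfx ++ option))

-- reference expansion of a template, cons-from-the-left
def expandA : List String → List String
  | [] => [""]
  | c :: t => (if c = "X" then ["0", "1"] else [c]).flatMap (fun o => (expandA t).map (fun s => o ++ s))

theorem join_empty_cons (s : String) (l : List String) :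
    PySem.Str.join "" (s :: l) = s ++ PySem.Str.join "" l := by
  cases l with
  | nil => simp [PySem.Str.join, PySem.Chars.join_singleton]
  | cons b rest => simp [PySem.Str.join, PySem.Chars.join_cons_cons]

theorem foldlA (vs : List String) (acc : List String) :
    vs.foldl stepA acc = acc.flatMap (fun p => (expandA (vs.map npv)).map (fun s => p ++ s)) := by
  induction vs generalizing acc with
  | nil => simp [expandA]
  | cons v vs ih =>
      simp only [List.foldl_cons, ih, List.map_cons, expandA]
      simp only [stepA, npv]
      by_cases h0 : normalize_binary_value v = "" <;>
        by_cases hX : normalize_binary_value v = "X" <;>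
          simp [h0, hX, List.flatMap_assoc, List.map_map,
            Function.comp_def, String.append_assoc]

theorem portA_eq (values : List String) :
    combinations_from_values values = expandA (values.map npv) := by
  have h : combinations_from_values values = values.foldl stepA [""] := rfl
  rw [h, foldlA]
  simp

theorem portB_core (t : List String) :
    (pyProduct01 (t.count "X")).map (fun bits => PySem.Str.join "" (fillTemplate t bits)) = expandA t := by
  induction t with
  | nil => simp [pyProduct01, fillTemplate, expandA, PySem.Str.join, PySem.Chars.join_nil]
  | cons c t ih =>
      by_cases hc : c = "X"
      · subst hc
        have hcnt : (("X" : String) :: t).count "X" = t.count "X" + 1 := by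
          simp
        rw [hcnt]
        simp only [pyProduct01, expandA]
        simp only [List.map_flatMap, List.map_map]
        refine List.flatMap_congr ?_
        intro b _
        rw [← ih]
        simp [Function.comp, fillTemplate, join_empty_cons]
      · have hcnt : (c :: t).count "X" = t.count "X" := by
          simp [hc]
        rw [hcnt]
        simp only [expandA, if_neg hc]
        rw [← ih]
        simp [fillTemplate, hc, join_empty_cons, Function.comp]

theorem portB_eq (values : List String) :
    combinations_from_values_alt values = expandA (values.map npv) := by
  have h : combinations_from_values_alt values =
      (pyProduct01 ((values.map npv).count "X")).map
        (fun bits => PySem.Str.join "" (fillTemplate (values.map npv) bits)) := rfl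
  rw [h, portB_core]

-- ===== VERDICT (by name: the statement is the Claim_ definition above) =====
theorem combinations_from_values_spec : Claim_equal_combinations_from_values := by
  intro values _
  unfold Spec_combinations_from_values
  rw [portA_eq, portB_eq]
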